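-- pv_equiv track=rewrite | github.com/ktothep/leetcode | 844. Backspace String Compare.py | Build
-- ===== SOURCE A (Python) =====
-- def Build(S):
--        ans=[]
--        flag=0
--        for c in reversed(range(len(S))):
--            if S[c]=="#":
--                flag+=1
--            elif flag!=0:
--                flag-=1
--            else:
--                ans.append(S[c])
--        return ''.join(ans)
-- ===== SOURCE B (Python) =====
-- def Build(S):
--     stack = []
--     for c in S:
--         if c == '#':
--             if stack:
--                 stack.pop()
--         else:
--             stack.append(c)
--     return ''.join(stack[::-1])
-- ===== Notes on version B (the rewrite author's own statement) =====
-- stated objective: idiomatic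
-- what changed: Replaces A's reverse scan over indices with a pending-backspace counter by a forward single pass over S using an explicit character stack (pop on '#', push otherwise), returning the reversed stack to match A's reverse output order.
import Mathlib
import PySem

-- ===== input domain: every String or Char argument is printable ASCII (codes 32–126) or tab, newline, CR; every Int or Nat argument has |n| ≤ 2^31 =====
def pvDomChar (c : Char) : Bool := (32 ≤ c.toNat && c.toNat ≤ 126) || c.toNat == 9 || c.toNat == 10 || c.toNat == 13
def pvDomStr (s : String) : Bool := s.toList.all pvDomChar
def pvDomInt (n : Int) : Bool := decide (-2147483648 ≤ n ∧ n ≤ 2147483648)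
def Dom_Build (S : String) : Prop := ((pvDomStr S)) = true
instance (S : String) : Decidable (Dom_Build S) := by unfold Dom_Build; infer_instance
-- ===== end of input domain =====

-- B replaces A's reverse scan + backspace counter by a forward single-pass character stack (idiomatic); same output.

-- ===== PORT A =====
-- A iterates the characters of S in reverse order (reversed(range(len(S))) with S[c]),
-- keeping (ans, flag); each step follows A's three branches in order.
def buildStepA (st : List Char × Int) (c : Char) : List Char × Int :=
  if c = '#' then (st.1, st.2 + 1)
  else if st.2 ≠ 0 then (st.1, st.2 - 1)
  else (st.1 ++ [c], st.2)

def Build (S : String) : String :=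
  String.ofList (S.toList.reverse.foldl buildStepA ([], 0)).1

-- ===== PORT B =====
-- forward pass: pop the stack on '#' (no-op when empty), push otherwise; return reversed stack.
def buildStepB (stack : List Char) (c : Char) : List Char :=
  if c = '#' then stack.dropLast else stack ++ [c]

def Build_alt (S : String) : String :=
  String.ofList ((S.toList.foldl buildStepB []).reverse)

-- ===== PRECONDITION & SPEC =====
def Spec_Build (S : String) (out : String) : Prop := out = Build_alt S
instance (S : String) (out : String) : Decidable (Spec_Build S out) := by unfold Spec_Build; infer_instance

-- ===== CLAIM (what is proved, stated in full; the proofs are below) =====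
def Claim_equal_Build : Prop := ∀ (S : String), Dom_Build S → Spec_Build S (Build S)

-- ===== LEMMAS AND PROOFS =====

-- A's right-to-left loop, written as a foldr (rightmost character processed first).
def buildR (l : List Char) : List Char × Int :=
  l.foldr (fun c st => buildStepA st c) ([], 0)

theorem buildR_flag_nonneg (l : List Char) : 0 ≤ (buildR l).2 := by
  induction l with
  | nil => simp [buildR]
  | cons c t ih =>
    have h : buildR (c :: t) = buildStepA (buildR t) c := by simp [buildR]
    rw [h]
    unfold buildStepA
    split_ifs with h1 h2 <;> simp only <;> omega

theorem build_eq_buildR (S : String) : Build S = String.ofList (buildR S.toList).1 := by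
  simp [Build, buildR, List.foldl_reverse]

-- Key invariant: running B's stack loop from an initial stack s over l removes the last
-- (buildR l).2 elements of s and then appends the survivors (buildR l).1 in reverse.
theorem foldl_stepB_char (l : List Char) : ∀ (s : List Char),
    l.foldl buildStepB s
      = s.take (s.length - (buildR l).2.toNat) ++ (buildR l).1.reverse := by
  induction l with
  | nil => intro s; simp [buildR]
  | cons c t ih =>
    intro s
    have hfl := buildR_flag_nonneg t
    have hrec : buildR (c :: t) = buildStepA (buildR t) c := by
      simp [buildR]
    rw [List.foldl_cons, hrec]
    by_cases hc : c = '#'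
    · have h1 : (buildStepA (buildR t) c).1 = (buildR t).1 := by simp [buildStepA, hc]
      have h2 : (buildStepA (buildR t) c).2 = (buildR t).2 + 1 := by simp [buildStepA, hc]
      have hB : buildStepB s c = s.dropLast := by simp [buildStepB, hc]
      rw [h1, h2, hB, ih s.dropLast]
      congr 1
      rcases s.eq_nil_or_concat with rfl | ⟨s', a, rfl⟩
      · simp
      · have hd : (s' ++ [a]).dropLast = s' := by simp
        have hlen : (s' ++ [a]).length = s'.length + 1 := by simp
        simp only [List.concat_eq_append, hd, hlen]
        have hle : s'.length + 1 - ((buildR t).2 + 1).toNat ≤ s'.length := by omega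
        rw [List.take_append_of_le_length hle]
        congr 1
        omega
    · have hB : buildStepB s c = s ++ [c] := by simp [buildStepB, hc]
      rw [hB]
      by_cases hf : (buildR t).2 = 0
      · have h1 : (buildStepA (buildR t) c).1 = (buildR t).1 ++ [c] := by
          simp [buildStepA, hc, hf]
        have h2 : (buildStepA (buildR t) c).2 = (buildR t).2 := by
          simp [buildStepA, hc, hf]
        rw [h1, h2, ih (s ++ [c])]
        simp [hf, List.take_of_length_le]
      · have h1 : (buildStepA (buildR t) c).1 = (buildR t).1 := by
          simp [buildStepA, hc, hf]
        have h2 : (buildStepA (buildR t) c).2 = (buildR t).2 - 1 := by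
          simp [buildStepA, hc, hf]
        rw [h1, h2, ih (s ++ [c])]
        congr 1
        have hle : s.length + 1 - (buildR t).2.toNat ≤ s.length := by omega
        have hlen : (s ++ [c]).length = s.length + 1 := by simp
        rw [hlen, List.take_append_of_le_length hle]
        congr 1
        omega

-- ===== VERDICT (by name: the statement is the Claim_ definition above) =====
theorem Build_spec : Claim_equal_Build := by
  intro S _
  unfold Spec_Build
  rw [build_eq_buildR, Build_alt, foldl_stepB_char]
  simp
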